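-- pv_equiv track=rewrite | github.com/HarshRajj/GFGquestions | Difficulty: Medium/Unique Number II/unique-number-ii.py | singleNum
-- ===== SOURCE A (Python) =====
-- def singleNum(arr):
-- 	# Code here
-- 	ans = []
-- 	dic = {}
-- 	for num in arr :
-- 	    dic[num] = dic.get(num, 0)+1
-- 	for k in dic :
-- 	    if dic[k] == 1 :
-- 	        ans.append(k)
-- 	return sorted(ans)
-- ===== SOURCE B (Python) =====
-- def singleNum(arr):
--     s = sorted(arr)
--     res = []
--     i = 0
--     n = len(s)
--     while i < n:
--         j = i + 1
--         while j < n and s[j] == s[i]: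
--             j += 1
--         if j - i == 1:
--             res.append(s[i])
--         i = j
--     return res
-- ===== Notes on version B (the rewrite author's own statement) =====
-- stated objective: alternative
-- what changed: Replaces the counting dict plus final sort of the unique keys by sorting a copy of the input first and scanning it once, emitting the values whose run of equal adjacent elements has length exactly 1.
import Mathlib
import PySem

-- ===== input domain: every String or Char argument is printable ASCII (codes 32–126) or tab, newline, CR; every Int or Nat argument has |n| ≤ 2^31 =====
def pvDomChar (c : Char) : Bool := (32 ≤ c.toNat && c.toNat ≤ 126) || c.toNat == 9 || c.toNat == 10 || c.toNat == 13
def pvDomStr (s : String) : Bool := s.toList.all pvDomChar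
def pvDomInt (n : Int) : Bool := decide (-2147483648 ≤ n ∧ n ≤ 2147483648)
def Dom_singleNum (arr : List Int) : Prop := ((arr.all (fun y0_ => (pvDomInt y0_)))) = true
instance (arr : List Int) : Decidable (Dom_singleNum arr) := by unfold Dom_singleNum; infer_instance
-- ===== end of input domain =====

-- B is an alternative algorithm of the same cost: sort a copy, then one pass over runs of equal
-- adjacent values, emitting values whose run has length exactly 1 (A counts in a dict and sorts the keys).

-- ===== PORT A =====
-- dic[num] = dic.get(num, 0) + 1 ; then 'for k in dic: if dic[k] == 1: ans.append(k)'.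
-- dic[k] for k in dic.keys always hits, so getD 0 is exact here.
def singleNum (arr : List Int) : List Int :=
  let ans : List Int := []
  let dic : PySem.Dict Int Int :=
    arr.foldl (fun d num => d.insert num (d.getD num 0 + 1)) PySem.Dict.empty
  let ans := dic.keys.foldl (fun a k => if dic.getD k 0 == 1 then a ++ [k] else a) ans
  PySem.List.sorted ans (fun x => x) false

-- ===== PORT B =====
-- the outer while over s: each step consumes the whole run of the head value
-- (the inner 'while s[j] == s[i]: j += 1' is takeWhile/dropWhile of that run;
-- 'j - i == 1' is 'the run beyond the head is empty').
def runScan : List Int → List Int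
  | [] => []
  | x :: rest =>
      let run := rest.takeWhile (· == x)
      let tail := rest.dropWhile (· == x)
      if run.length = 0 then x :: runScan tail else runScan tail
termination_by s => s.length
decreasing_by
  all_goals simpa using Nat.lt_succ_of_le (List.length_dropWhile_le (p := (· == x)) (l := rest))

def singleNum_alt (arr : List Int) : List Int :=
  runScan (PySem.List.sorted arr (fun x => x) false)

-- ===== PRECONDITION & SPEC =====
def Spec_singleNum (arr : List Int) (out : List Int) : Prop := out = singleNum_alt arr
instance (arr : List Int) (out : List Int) : Decidable (Spec_singleNum arr out) := by unfold Spec_singleNum; infer_instance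

-- ===== CLAIM (what is proved, stated in full; the proofs are below) =====
def Claim_equal_singleNum : Prop := ∀ (arr : List Int), Dom_singleNum arr → Spec_singleNum arr (singleNum arr)

-- ===== LEMMAS AND PROOFS =====

-- in a ≤-sorted list x :: rest, everything past the initial run of x is > x
theorem drop_gt (x : Int) (rest : List Int) (h : (x :: rest).Pairwise (· ≤ ·)) :
    ∀ z ∈ rest.dropWhile (· == x), x < z := by
  induction rest with
  | nil => simp
  | cons y ys ih =>
    obtain ⟨hx, hyys⟩ := List.pairwise_cons.mp h
    by_cases hyx : y = x
    · subst hyx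
      intro z hz
      rw [List.dropWhile_cons_of_pos (by simp)] at hz
      exact ih (List.pairwise_cons.mpr ⟨fun b hb => (List.pairwise_cons.mp hyys).1 b hb, (List.pairwise_cons.mp hyys).2⟩) z hz
    · intro z hz
      rw [List.dropWhile_cons_of_neg (by simp [hyx])] at hz
      have hxy : x < y := lt_of_le_of_ne (hx y (by simp)) (fun e => hyx e.symm)
      rcases List.mem_cons.mp hz with rfl | hz'
      · exact hxy
      · exact lt_of_lt_of_le hxy ((List.pairwise_cons.mp hyys).1 z hz')

-- On a ≤-sorted list, runScan is strictly increasing and contains exactly the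
-- values of count 1.
theorem runScan_spec_aux (n : Nat) : ∀ (s : List Int), s.length ≤ n → s.Pairwise (· ≤ ·) →
    (runScan s).Pairwise (· < ·) ∧ (∀ x, x ∈ runScan s ↔ s.count x = 1) := by
  induction n with
  | zero =>
    intro s hl _
    have : s = [] := List.eq_nil_of_length_eq_zero (Nat.le_zero.mp hl)
    subst this; simp [runScan]
  | succ n ih =>
    intro s hl hs
    match s with
    | [] => simp [runScan]
    | x :: rest =>
      have hx_le : ∀ y ∈ rest, x ≤ y := (List.pairwise_cons.mp hs).1
      have hrest_pw : rest.Pairwise (· ≤ ·) := (List.pairwise_cons.mp hs).2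
      have hrt : rest.takeWhile (· == x) ++ rest.dropWhile (· == x) = rest :=
        List.takeWhile_append_dropWhile
      have htail_pw : (rest.dropWhile (· == x)).Pairwise (· ≤ ·) :=
        hrest_pw.sublist (List.dropWhile_sublist _)
      have htail_len : (rest.dropWhile (· == x)).length ≤ n := by
        have := List.length_dropWhile_le (p := (· == x)) (l := rest)
        simp at hl; omega
      have htail_gt : ∀ z ∈ rest.dropWhile (· == x), x < z := drop_gt x rest hs
      obtain ⟨pwt, memt⟩ := ih (rest.dropWhile (· == x)) htail_len htail_pw
      have hcount_tail_x : (rest.dropWhile (· == x)).count x = 0 :=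
        List.count_eq_zero.mpr (fun hz => lt_irrefl x (htail_gt x hz))
      have hcount_run_x : (rest.takeWhile (· == x)).count x = (rest.takeWhile (· == x)).length :=
        List.count_eq_length.mpr (fun b hb => by
          have := List.mem_takeWhile_imp hb; simpa using (by simpa using this : b = x).symm)
      have hcx : (x :: rest).count x = 1 + (rest.takeWhile (· == x)).length := by
        have h1 : List.count x rest
            = List.count x (rest.takeWhile (· == x) ++ rest.dropWhile (· == x)) := by rw [hrt]
        rw [List.count_append] at h1
        rw [List.count_cons_self, h1, hcount_run_x, hcount_tail_x]; omega
      have hcy : ∀ y, y ≠ x → (x :: rest).count y = (rest.dropWhile (· == x)).count y := by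
        intro y hy
        have hrun0 : (rest.takeWhile (· == x)).count y = 0 :=
          List.count_eq_zero.mpr (fun hz => hy (by simpa using List.mem_takeWhile_imp hz))
        have h1 : List.count y rest
            = List.count y (rest.takeWhile (· == x) ++ rest.dropWhile (· == x)) := by rw [hrt]
        rw [List.count_append] at h1
        simp [(Ne.symm hy : x ≠ y), h1, hrun0]
      have hmem_sub : ∀ z ∈ runScan (rest.dropWhile (· == x)), z ∈ rest.dropWhile (· == x) := by
        intro z hz
        exact List.count_pos_iff.mp (by rw [(memt z).mp hz]; omega)
      by_cases hr0 : (rest.takeWhile (· == x)).length = 0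
      · have hrs : runScan (x :: rest) = x :: runScan (rest.dropWhile (· == x)) := by
          simp only [runScan]; rw [if_pos hr0]
        constructor
        · rw [hrs]
          exact List.pairwise_cons.mpr ⟨fun z hz => htail_gt z (hmem_sub z hz), pwt⟩
        · intro y
          rw [hrs]
          by_cases hy : y = x
          · subst hy
            simp only [List.mem_cons, true_or, true_iff]
            omega
          · rw [List.mem_cons]
            have hnyx : ¬ (y = x) := hy
            rw [hcy y hy]
            exact ⟨fun h => (memt y).mp (h.resolve_left hnyx), fun h => Or.inr ((memt y).mpr h)⟩
      · have hrs : runScan (x :: rest) = runScan (rest.dropWhile (· == x)) := by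
          simp only [runScan]; rw [if_neg hr0]
        constructor
        · rw [hrs]; exact pwt
        · intro y
          rw [hrs]
          by_cases hy : y = x
          · subst hy
            constructor
            · intro h
              have h2 := (memt _).mp h
              omega
            · intro h
              exact absurd h (by omega)
          · rw [hcy y hy]; exact memt y

theorem runScan_spec (s : List Int) (hs : s.Pairwise (· ≤ ·)) :
    (runScan s).Pairwise (· < ·) ∧ (∀ x, x ∈ runScan s ↔ s.count x = 1) :=
  runScan_spec_aux s.length s (le_refl _) hs

theorem singleNum_spec : Claim_equal_singleNum := by
  intro arr _
  show singleNum arr = singleNum_alt arr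
  have hA : singleNum arr =
      PySem.List.sorted ((PySem.Set.ofList arr).filter (fun k => ((arr.count k : Int) == 1)))
        (fun x => x) false := by
    simp only [singleNum]
    rw [PySem.Dict.foldl_insert_getD_add_one_eq_counter, PySem.Dict.keys_counter]
    simp only [PySem.Dict.getD_counter]
    rw [PySem.List.foldl_append_if_eq_filter]
    simp
  rw [hA]
  unfold singleNum_alt
  have hs_pw : (PySem.List.sorted arr (fun x => x) false).Pairwise (· ≤ ·) :=
    PySem.List.sorted_pairwise arr (fun x => x)
  obtain ⟨hpw, hmem⟩ := runScan_spec _ hs_pw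
  apply PySem.List.sorted_eq_of_perm_of_pairwise_lt
  · refine (List.perm_ext_iff_of_nodup ?_ ?_).mpr ?_
    · exact List.Pairwise.imp (fun h => ne_of_lt h) hpw
    · exact List.Nodup.filter _ (PySem.Set.nodup_ofList arr)
    · intro a
      rw [hmem a, List.mem_filter, PySem.Set.mem_ofList,
        (PySem.List.sorted_perm arr (fun x => x) false).count_eq]
      constructor
      · intro h
        refine ⟨List.count_pos_iff.mp (by omega), by simp [h]⟩
      · rintro ⟨_, h⟩
        have : (arr.count a : Int) = 1 := by simpa using h
        omega
  · exact hpw
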